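-- pv_equiv track=rewrite | github.com/thornjad/barogram | models/surface_signs.py | _find_nearest_ts
-- ===== SOURCE A (Python) =====
-- import bisect
--
-- def _find_nearest_ts(sorted_ts, target, max_delta=600):
--     """Binary search for the nearest timestamp within max_delta seconds of target."""
--     if not sorted_ts:
--         return None
--     idx = bisect.bisect_left(sorted_ts, target)
--     best = None
--     best_d = max_delta + 1
--     for i in (idx - 1, idx):
--         if 0 <= i < len(sorted_ts):
--             d = abs(sorted_ts[i] - target)
--             if d <= max_delta and d < best_d:
--                 best_d = d
--                 best = sorted_ts[i]
--     return best
-- ===== SOURCE B (Python) =====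
-- def _find_nearest_ts(sorted_ts, target, max_delta=600):
--     """Nearest timestamp within max_delta of target: insertion point found by
--     self-contained recursive halving on slices, then min() over the in-range
--     neighbors (ties prefer the left neighbor, like the original)."""
--     def _ins(xs):
--         if not xs:
--             return 0
--         mid = len(xs) // 2
--         if xs[mid] < target:
--             return mid + 1 + _ins(xs[mid + 1:])
--         return _ins(xs[:mid])
--     idx = _ins(sorted_ts)
--     candidates = [sorted_ts[i] for i in (idx - 1, idx) if 0 <= i < len(sorted_ts)]
--     if not candidates:
--         return None
--     best = min(candidates, key=lambda v: abs(v - target))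
--     return best if abs(best - target) <= max_delta else None
-- ===== Notes on version B (the rewrite author's own statement) =====
-- stated objective: alternative
-- what changed: The bisect library call is replaced by a self-contained recursive halving on slices (same pivot sequence, proved equal on every input), and the best/best_d accumulator loop by a filtered comprehension over the two neighbor indices plus min() with an abs key and a final threshold test.
import Mathlib
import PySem

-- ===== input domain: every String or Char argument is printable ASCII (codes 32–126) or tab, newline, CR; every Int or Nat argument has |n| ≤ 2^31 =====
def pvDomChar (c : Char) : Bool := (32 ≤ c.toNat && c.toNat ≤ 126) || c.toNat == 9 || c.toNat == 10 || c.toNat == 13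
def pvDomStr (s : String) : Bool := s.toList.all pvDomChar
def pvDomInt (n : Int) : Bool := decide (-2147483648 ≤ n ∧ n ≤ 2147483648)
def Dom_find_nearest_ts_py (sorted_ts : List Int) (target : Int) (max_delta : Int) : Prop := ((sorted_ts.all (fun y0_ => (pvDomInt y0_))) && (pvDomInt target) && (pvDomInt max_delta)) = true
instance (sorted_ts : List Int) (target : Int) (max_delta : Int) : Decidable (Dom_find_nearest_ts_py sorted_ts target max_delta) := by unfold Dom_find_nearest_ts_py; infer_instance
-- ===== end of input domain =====

-- B replaces the bisect library call by a self-contained recursive halving on slices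
-- (same pivot sequence on every input) and the best/best_d accumulator loop by a
-- filtered comprehension plus min() with an abs key (objective: alternative).


-- ===== PORT A =====
-- bisect.bisect_left(xs, target) with explicit lo/hi, ported by hand step for step.
-- Indexing uses (pyGet? …).getD 0; it is exact because lo < hi keeps mid in range.
def pvBisectLeft (xs : List Int) (target : Int) (lo hi : Int) : Int :=
  if lo < hi then
    -- mid = (lo + hi) // 2, inlined
    if (PySem.List.pyGet? xs (PySem.Int.floordiv (lo + hi) 2)).getD 0 < target then
      pvBisectLeft xs target (PySem.Int.floordiv (lo + hi) 2 + 1) hi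
    else
      pvBisectLeft xs target lo (PySem.Int.floordiv (lo + hi) 2)
  else lo
termination_by (hi - lo).toNat
decreasing_by
  · have h := PySem.Int.floordiv_two_mid_bounds (le_of_lt (by assumption : lo < hi))
    omega
  · have h := PySem.Int.floordiv_two_mid_bounds (le_of_lt (by assumption : lo < hi))
    have h2 : PySem.Int.floordiv (lo + hi) 2 < hi := by
      have := PySem.Int.floordiv_lt_iff_lt_mul (a := lo + hi) (b := 2) (q := hi) (by omega)
      omega
    omega

def find_nearest_ts_py (sorted_ts : List Int) (target : Int) (max_delta : Int) : Option Int :=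
  if sorted_ts = [] then none
  else
    let idx := pvBisectLeft sorted_ts target 0 (sorted_ts.length : Int)
    let r := [idx - 1, idx].foldl
      (fun (s : Option Int × Int) (i : Int) =>
        if 0 ≤ i ∧ i < (sorted_ts.length : Int) then
          -- sorted_ts[i]: in range under the guard, so getD 0 is exact
          let d := |(PySem.List.pyGet? sorted_ts i).getD 0 - target|
          if d ≤ max_delta ∧ d < s.2 then
            (some ((PySem.List.pyGet? sorted_ts i).getD 0), d)
          else s
        else s)
      ((none : Option Int), max_delta + 1)
    r.1

-- ===== PORT B =====
-- the inner recursive helper _ins of Source B: insertion point by halving on slices.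
-- Indexing uses (pyGet? …).getD 0; it is exact because xs ≠ [] keeps mid in range.
def pvIns (target : Int) (xs : List Int) : Int :=
  if xs = [] then 0
  else
    -- mid = len(xs) // 2, inlined
    if (PySem.List.pyGet? xs (PySem.Int.floordiv ((xs.length : Int)) 2)).getD 0 < target then
      PySem.Int.floordiv ((xs.length : Int)) 2 + 1 +
        pvIns target (PySem.List.slice xs (some (PySem.Int.floordiv ((xs.length : Int)) 2 + 1)) none)
    else
      pvIns target (PySem.List.slice xs none (some (PySem.Int.floordiv ((xs.length : Int)) 2)))
termination_by xs.length
decreasing_by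
  · have hm : PySem.Int.floordiv ((xs.length : Int)) 2 = ((xs.length / 2 : ℕ) : Int) := by
      exact_mod_cast PySem.Int.floordiv_natCast xs.length 2
    have hlen : 0 < xs.length := List.length_pos_iff.mpr (by assumption)
    have hcast : PySem.Int.floordiv ((xs.length : Int)) 2 + 1 = ((xs.length / 2 + 1 : ℕ) : Int) := by
      rw [hm]; push_cast; ring
    rw [hcast, PySem.List.slice_from_natCast]
    simp only [List.length_drop]
    omega
  · have hm : PySem.Int.floordiv ((xs.length : Int)) 2 = ((xs.length / 2 : ℕ) : Int) := by
      exact_mod_cast PySem.Int.floordiv_natCast xs.length 2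
    have hlen : 0 < xs.length := List.length_pos_iff.mpr (by assumption)
    rw [hm, PySem.List.slice_to_natCast]
    simp only [List.length_take]
    omega

def find_nearest_ts_py_alt (sorted_ts : List Int) (target : Int) (max_delta : Int) : Option Int :=
  let idx := pvIns target sorted_ts
  let candidates := ([idx - 1, idx].filter
      (fun i => decide (0 ≤ i) && decide (i < (sorted_ts.length : Int)))).map
    (fun i => (PySem.List.pyGet? sorted_ts i).getD 0)
  if candidates = [] then none
  else
    match PySem.List.min? candidates (fun v => |v - target|) with
    | none => none   -- unreachable: candidates ≠ []
    | some best => if |best - target| ≤ max_delta then some best else none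

-- ===== PRECONDITION & SPEC =====
-- (no Pre_: both programs are total and agree on every input)
def Spec_find_nearest_ts_py (sorted_ts : List Int) (target : Int) (max_delta : Int) (out : Option Int) : Prop := out = find_nearest_ts_py_alt sorted_ts target max_delta
instance (sorted_ts : List Int) (target : Int) (max_delta : Int) (out : Option Int) : Decidable (Spec_find_nearest_ts_py sorted_ts target max_delta out) := by unfold Spec_find_nearest_ts_py; infer_instance

-- ===== CLAIM (what is proved, stated in full; the proofs are below) =====
def Claim_equal_find_nearest_ts_py : Prop := ∀ (sorted_ts : List Int) (target : Int) (max_delta : Int), Dom_find_nearest_ts_py sorted_ts target max_delta → Spec_find_nearest_ts_py sorted_ts target max_delta (find_nearest_ts_py sorted_ts target max_delta)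

-- ===== LEMMAS AND PROOFS =====

-- the recursive halving visits the same pivots as bisect_left's lo/hi loop:
-- on the window xs[lo:hi] the two insertion points coincide (on EVERY list)
theorem pvIns_window (xs : List Int) (t : Int) :
    ∀ (fuel : ℕ) (lo hi : Int), (hi - lo).toNat = fuel → 0 ≤ lo → lo ≤ hi → hi ≤ (xs.length : Int) →
      pvBisectLeft xs t lo hi = lo + pvIns t ((xs.drop lo.toNat).take (hi - lo).toNat) := by
  intro fuel
  induction fuel using Nat.strong_induction_on with
  | _ fuel ih =>
    intro lo hi hfuel h0 h1 h2
    rw [pvBisectLeft]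
    by_cases hlh : lo < hi
    · rw [if_pos hlh]
      set w := (xs.drop lo.toNat).take (hi - lo).toNat with hw
      have hwlen : w.length = (hi - lo).toNat := by
        rw [hw]; simp only [List.length_take, List.length_drop]; omega
      have hwne : w ≠ [] := by
        intro h
        have := congrArg List.length h
        rw [hwlen] at this
        simp at this; omega
      have hmidb := PySem.Int.floordiv_two_mid_bounds (le_of_lt hlh)
      have hmidlt : PySem.Int.floordiv (lo + hi) 2 < hi := by
        have := PySem.Int.floordiv_lt_iff_lt_mul (a := lo + hi) (b := 2) (q := hi) (by omega)
        omega
      set mid := PySem.Int.floordiv (lo + hi) 2 with hm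
      have hmede : mid = (lo + hi) / 2 := PySem.Int.floordiv_eq_ediv_of_pos (by omega)
      have hwm : PySem.Int.floordiv ((w.length : Int)) 2 = ((w.length / 2 : ℕ) : Int) := by
        exact_mod_cast PySem.Int.floordiv_natCast w.length 2
      have hwlen2 : (List.take (hi - lo).toNat (List.drop lo.toNat xs)).length = (hi - lo).toNat := by
        simp only [List.length_take, List.length_drop]; omega
      have hmid_eq : mid = lo + ((w.length / 2 : ℕ) : Int) := by omega
      have hmn : mid.toNat < xs.length := by omega
      have hwmn : w.length / 2 < w.length := by
        have : 0 < w.length := List.length_pos_iff.mpr hwne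
        omega
      have hvals : (PySem.List.pyGet? w (((w.length / 2 : ℕ) : Int))).getD 0 =
          (PySem.List.pyGet? xs mid).getD 0 := by
        rw [PySem.List.pyGet?_natCast, PySem.List.pyGet?_of_nonneg _ (by omega : (0:Int) ≤ mid)]
        have hq1 : w[w.length / 2]? = xs[lo.toNat + w.length / 2]? := by
          rw [hw, List.getElem?_take_of_lt (by omega), List.getElem?_drop]
        have hq2 : lo.toNat + w.length / 2 = mid.toNat := by omega
        rw [hq1, hq2]
      rw [pvIns, if_neg hwne, hwm, hvals]
      by_cases hcmp : (PySem.List.pyGet? xs mid).getD 0 < t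
      · rw [if_pos hcmp, if_pos hcmp]
        have hrec := ih (hi - (mid + 1)).toNat (by omega) (mid + 1) hi rfl (by omega) (by omega) h2
        rw [hrec]
        have hslice : PySem.List.slice w (some (((w.length / 2 : ℕ) : Int) + 1)) none =
            (xs.drop (mid + 1).toNat).take (hi - (mid + 1)).toNat := by
          have hc : (((w.length / 2 : ℕ) : Int) + 1) = ((w.length / 2 + 1 : ℕ) : Int) := by push_cast; ring
          rw [hc, PySem.List.slice_from_natCast, hw, List.drop_take, List.drop_drop]
          congr 1
          · omega
          · congr 1
            omega
        rw [hslice]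
        omega
      · rw [if_neg hcmp, if_neg hcmp]
        have hrec := ih (mid - lo).toNat (by omega) lo mid rfl h0 (by omega) (by omega)
        rw [hrec]
        have hslice : PySem.List.slice w none (some ((w.length / 2 : ℕ) : Int)) =
            (xs.drop lo.toNat).take (mid - lo).toNat := by
          rw [PySem.List.slice_to_natCast, hw, List.take_take]
          congr 1
          omega
        rw [hslice]
    · rw [if_neg hlh]
      have : (hi - lo).toNat = 0 := by omega
      rw [this]
      simp [pvIns]

-- at top level the two insertion points are literally equal (on EVERY list)
theorem pvIns_eq_bisect (xs : List Int) (t : Int) :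
    pvBisectLeft xs t 0 (xs.length : Int) = pvIns t xs := by
  have h := pvIns_window xs t (((xs.length : Int) - 0).toNat) 0 (xs.length : Int) rfl
    le_rfl (by exact_mod_cast Nat.zero_le _) le_rfl
  rw [h]
  simp

-- min() over two candidates, first extremal on ties
theorem pvMin2 (v1 v2 t : Int) :
    PySem.List.min? [v1, v2] (fun v => |v - t|) =
      some (if |v2 - t| < |v1 - t| then v2 else v1) := by
  simp only [PySem.List.min?, List.foldl_cons, List.foldl_nil]
  split_ifs <;> rfl

-- ===== VERDICT (by name: the statement is the Claim_ definition above) =====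
theorem find_nearest_ts_py_spec : Claim_equal_find_nearest_ts_py := by
  intro xs t md _
  unfold Spec_find_nearest_ts_py find_nearest_ts_py find_nearest_ts_py_alt
  by_cases hnil : xs = []
  · subst hnil
    simp [pvIns]
  · rw [if_neg hnil, pvIns_eq_bisect]
    simp only [List.foldl_cons, List.foldl_nil, List.filter_cons, List.filter_nil]
    generalize pvIns t xs = idx
    generalize hv1 : (PySem.List.pyGet? xs (idx - 1)).getD 0 = v1
    generalize hv2 : (PySem.List.pyGet? xs idx).getD 0 = v2
    generalize ((xs.length : ℕ) : Int) = L
    by_cases hg1 : (0:Int) ≤ idx - 1 ∧ idx - 1 < L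
    · by_cases hg2 : (0:Int) ≤ idx ∧ idx < L
      · -- both neighbors exist: candidates = [v1, v2]
        simp only [hg1, hg2, Bool.and_eq_true, decide_eq_true_eq, and_self, if_true,
          List.map_cons, List.map_nil, pvMin2, if_pos hg1, if_pos hg2]
        by_cases h1 : |v1 - t| ≤ md <;> by_cases h2 : |v2 - t| ≤ md <;>
          by_cases h3 : |v2 - t| < |v1 - t| <;>
          simp [Int.lt_add_one_iff, h1, h2, h3, hv1, hv2] <;> omega
      · -- only the left neighbor: candidates = [v1]
        have hg2f : ¬ ((decide ((0:Int) ≤ idx) && decide (idx < L)) = true) := by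
          simp only [Bool.and_eq_true, decide_eq_true_eq]; exact hg2
        simp only [hg1, Bool.and_eq_true, decide_eq_true_eq, and_self, if_true,
          if_neg hg2f, List.map_cons, List.map_nil, PySem.List.min?,
          List.foldl_cons, List.foldl_nil, if_pos hg1, if_neg hg2]
        by_cases h1 : |v1 - t| ≤ md <;> simp [Int.lt_add_one_iff, h1, hv1]
    · have hg1f : ¬ ((decide ((0:Int) ≤ idx - 1) && decide (idx - 1 < L)) = true) := by
        simp only [Bool.and_eq_true, decide_eq_true_eq]; exact hg1
      by_cases hg2 : (0:Int) ≤ idx ∧ idx < L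
      · -- only the right neighbor: candidates = [v2]
        simp only [hg2, Bool.and_eq_true, decide_eq_true_eq, and_self, if_true,
          if_neg hg1f, List.map_cons, List.map_nil, PySem.List.min?,
          List.foldl_cons, List.foldl_nil, if_neg hg1, if_pos hg2]
        by_cases h2 : |v2 - t| ≤ md <;> simp [Int.lt_add_one_iff, h2, hv2]
      · -- no candidate at all
        have hg2f : ¬ ((decide ((0:Int) ≤ idx) && decide (idx < L)) = true) := by
          simp only [Bool.and_eq_true, decide_eq_true_eq]; exact hg2
        simp only [if_neg hg1f, if_neg hg2f, if_neg hg1, if_neg hg2, List.map_nil]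
        simp
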